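-- pv_equiv track=rewrite | github.com/inematds/BettaFish | MindSpider/DeepSentimentCrawling/keyword_manager.py | _filter_keywords_by_platform
-- ===== SOURCE A (Python) =====
-- from typing import List, Dict, Optional
--
-- def _filter_keywords_by_platform(keywords: List[str], platform: str) -> List[str]:
--     """
--     Filtrar palavras-chave de acordo com as caracteristicas da plataforma
--
--     Args:
--         keywords: Lista de palavras-chave original
--         platform: Nome da plataforma
--
--     Returns:
--         Lista de palavras-chave filtrada
--     """
--     # Mapeamento de palavras-chave por caracteristicas da plataforma (ajustavel conforme necessidade)
--     platform_preferences = {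
--         'xhs': ['beleza', 'moda', 'estilo de vida', 'gastronomia', 'turismo', 'compras', 'saude', 'bem-estar'],
--         'dy': ['entretenimento', 'musica', 'danca', 'humor', 'gastronomia', 'estilo de vida', 'tecnologia', 'educacao'],
--         'ks': ['estilo de vida', 'humor', 'rural', 'gastronomia', 'artesanato', 'musica', 'entretenimento'],
--         'bili': ['tecnologia', 'jogos', 'anime', 'aprendizado', 'programacao', 'digital', 'divulgacao cientifica'],
--         'wb': ['destaques', 'noticias', 'entretenimento', 'celebridades', 'sociedade', 'atualidades', 'tecnologia'],
--         'tieba': ['jogos', 'anime', 'aprendizado', 'estilo de vida', 'interesses', 'discussoes'],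
--         'zhihu': ['conhecimento', 'aprendizado', 'tecnologia', 'carreira', 'investimento', 'educacao', 'reflexao']
--     }
--
--     # Se a plataforma tem preferencias especificas, priorizar palavras-chave relacionadas
--     preferred_keywords = platform_preferences.get(platform, [])
--
--     if preferred_keywords:
--         # Selecionar primeiro palavras-chave preferidas da plataforma
--         filtered = []
--         remaining = []
--
--         for keyword in keywords:
--             if any(pref in keyword for pref in preferred_keywords):
--                 filtered.append(keyword)
--             else:
--                 remaining.append(keyword)
--
--         # Se palavras-chave preferidas nao forem suficientes, complementar com outras
--         if len(filtered) < len(keywords) // 2: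
--             filtered.extend(remaining[:len(keywords) - len(filtered)])
--
--         return filtered
--
--     # Se nao houver preferencias especificas, retornar palavras-chave originais
--     return keywords
-- ===== SOURCE B (Python) =====
-- from typing import List
--
--
-- def _filter_keywords_by_platform(keywords: List[str], platform: str) -> List[str]:
--     platform_preferences = {
--         'xhs': ['beleza', 'moda', 'estilo de vida', 'gastronomia', 'turismo', 'compras', 'saude', 'bem-estar'],
--         'dy': ['entretenimento', 'musica', 'danca', 'humor', 'gastronomia', 'estilo de vida', 'tecnologia', 'educacao'],
--         'ks': ['estilo de vida', 'humor', 'rural', 'gastronomia', 'artesanato', 'musica', 'entretenimento'],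
--         'bili': ['tecnologia', 'jogos', 'anime', 'aprendizado', 'programacao', 'digital', 'divulgacao cientifica'],
--         'wb': ['destaques', 'noticias', 'entretenimento', 'celebridades', 'sociedade', 'atualidades', 'tecnologia'],
--         'tieba': ['jogos', 'anime', 'aprendizado', 'estilo de vida', 'interesses', 'discussoes'],
--         'zhihu': ['conhecimento', 'aprendizado', 'tecnologia', 'carreira', 'investimento', 'educacao', 'reflexao']
--     }
--
--     prefs = platform_preferences.get(platform, [])
--     if not prefs:
--         return keywords
--
--     def is_match(keyword: str) -> bool:
--         return any(pref in keyword for pref in prefs)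
--
--     n_match = sum(1 for k in keywords if is_match(k))
--     if n_match >= len(keywords) // 2:
--         # enough preferred keywords: keep only those
--         return [k for k in keywords if is_match(k)]
--     # otherwise all keywords survive, stably reordered with matches first
--     return sorted(keywords, key=lambda k: 0 if is_match(k) else 1)
-- ===== Notes on version B (the rewrite author's own statement) =====
-- stated objective: alternative
-- what changed: Replaces A's two-accumulator loop plus conditional slice-extend with a count of matching keywords: return the matches alone when they reach len(keywords)//2, otherwise a stable 0/1-key sort that reorders all keywords with matches first.
import Mathlib
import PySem

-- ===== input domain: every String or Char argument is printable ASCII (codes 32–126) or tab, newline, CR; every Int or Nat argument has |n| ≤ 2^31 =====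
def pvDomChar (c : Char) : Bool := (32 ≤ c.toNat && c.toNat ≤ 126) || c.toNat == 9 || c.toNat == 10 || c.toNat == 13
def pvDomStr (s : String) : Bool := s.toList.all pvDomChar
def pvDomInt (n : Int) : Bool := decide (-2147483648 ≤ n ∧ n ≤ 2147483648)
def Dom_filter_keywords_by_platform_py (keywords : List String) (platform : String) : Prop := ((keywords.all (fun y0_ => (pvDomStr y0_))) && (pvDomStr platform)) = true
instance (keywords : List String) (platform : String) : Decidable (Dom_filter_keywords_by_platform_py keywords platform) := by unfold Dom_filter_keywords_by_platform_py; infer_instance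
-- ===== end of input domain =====

-- B replaces A's two-accumulator loop + conditional slice-extend by a match count and,
-- for the reorder case, a stable 0/1-key sort (alternative decomposition, same cost).


-- ===== PORT A =====
-- the platform_preferences dict literal, shared verbatim by both Pythons
def pvPlatformPrefs : PySem.Dict String (List String) :=
  PySem.Dict.ofList
    [ ("xhs", ["beleza", "moda", "estilo de vida", "gastronomia", "turismo", "compras", "saude", "bem-estar"]),
      ("dy", ["entretenimento", "musica", "danca", "humor", "gastronomia", "estilo de vida", "tecnologia", "educacao"]),
      ("ks", ["estilo de vida", "humor", "rural", "gastronomia", "artesanato", "musica", "entretenimento"]),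
      ("bili", ["tecnologia", "jogos", "anime", "aprendizado", "programacao", "digital", "divulgacao cientifica"]),
      ("wb", ["destaques", "noticias", "entretenimento", "celebridades", "sociedade", "atualidades", "tecnologia"]),
      ("tieba", ["jogos", "anime", "aprendizado", "estilo de vida", "interesses", "discussoes"]),
      ("zhihu", ["conhecimento", "aprendizado", "tecnologia", "carreira", "investimento", "educacao", "reflexao"]) ]

def filter_keywords_by_platform_py (keywords : List String) (platform : String) : List String :=
  let preferred_keywords := pvPlatformPrefs.getD platform []
  if preferred_keywords ≠ [] then
    -- for keyword in keywords: append to filtered / remaining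
    let p := keywords.foldl
      (fun (acc : List String × List String) keyword =>
        if preferred_keywords.any (fun pref => PySem.Str.isIn pref keyword) then
          (acc.1 ++ [keyword], acc.2)
        else
          (acc.1, acc.2 ++ [keyword]))
      ([], [])
    let filtered := p.1
    let remaining := p.2
    if filtered.length < keywords.length / 2 then
      filtered ++ PySem.List.slice remaining none (some ((keywords.length : Int) - (filtered.length : Int)))
    else
      filtered
  else
    keywords

-- ===== PORT B =====
def filter_keywords_by_platform_py_alt (keywords : List String) (platform : String) : List String :=
  let prefs := pvPlatformPrefs.getD platform []
  if prefs = [] then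
    keywords
  else
    let is_match := fun (keyword : String) => prefs.any (fun pref => PySem.Str.isIn pref keyword)
    let n_match := keywords.countP is_match
    if keywords.length / 2 ≤ n_match then
      keywords.filter is_match
    else
      PySem.List.sorted keywords (fun k => if is_match k then (0 : Int) else 1) false

-- ===== PRECONDITION & SPEC =====
def Spec_filter_keywords_by_platform_py (keywords : List String) (platform : String) (out : List String) : Prop := out = filter_keywords_by_platform_py_alt keywords platform
instance (keywords : List String) (platform : String) (out : List String) : Decidable (Spec_filter_keywords_by_platform_py keywords platform out) := by unfold Spec_filter_keywords_by_platform_py; infer_instance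

-- ===== CLAIM (what is proved, stated in full; the proofs are below) =====
def Claim_equal_filter_keywords_by_platform_py : Prop := ∀ (keywords : List String) (platform : String), Dom_filter_keywords_by_platform_py keywords platform → Spec_filter_keywords_by_platform_py keywords platform (filter_keywords_by_platform_py keywords platform)

-- ===== LEMMAS AND PROOFS =====

-- A's loop builds exactly (filter, filter-not) of the processed keywords.
theorem pvFoldl_partition (m : String → Bool) :
    ∀ (xs F R : List String),
      xs.foldl (fun (acc : List String × List String) keyword =>
        if m keyword then (acc.1 ++ [keyword], acc.2) else (acc.1, acc.2 ++ [keyword])) (F, R)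
      = (F ++ xs.filter m, R ++ xs.filter (fun x => !m x)) := by
  intro xs
  induction xs with
  | nil => simp
  | cons x xs ih =>
    intro F R
    by_cases h : m x = true
    · simp [List.foldl_cons, h, ih]
    · simp only [Bool.not_eq_true] at h
      simp [List.foldl_cons, h, ih]

-- inserting a 0-key element into (0-keys ++ 1-keys) lands between the blocks
theorem pvInsert_match (p : String → Bool) (x : String) (hx : p x = true) :
    ∀ (F R : List String), (∀ y ∈ F, p y = true) → (∀ y ∈ R, p y = false) →
      PySem.List.insertBy
        (fun a b => decide ((if p a then (0 : Int) else 1) < (if p b then (0 : Int) else 1)))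
        x (F ++ R) = F ++ x :: R := by
  intro F
  induction F with
  | nil =>
    intro R _ hR
    cases R with
    | nil => simp [PySem.List.insertBy]
    | cons r R' =>
      have hr : p r = false := hR r (by simp)
      simp [PySem.List.insertBy, hx, hr]
  | cons f F' ih =>
    intro R hF hR
    have hf : p f = true := hF f (by simp)
    simp only [List.cons_append, PySem.List.insertBy, hx, hf]
    simp [ih R (fun y hy => hF y (by simp [hy])) hR]

-- inserting a 1-key element appends it at the end
theorem pvInsert_nonmatch (p : String → Bool) (x : String) (hx : p x = false) (ys : List String) :
    PySem.List.insertBy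
      (fun a b => decide ((if p a then (0 : Int) else 1) < (if p b then (0 : Int) else 1)))
      x ys = ys ++ [x] := by
  apply PySem.List.insertBy_of_forall_not_before
  intro y _
  by_cases hy : p y = true <;> simp [hx, hy]

-- B's stable sort by the 0/1 key is the stable partition: matches first, then the rest
theorem pvSorted_partition (p : String → Bool) :
    ∀ (xs F R : List String), (∀ y ∈ F, p y = true) → (∀ y ∈ R, p y = false) →
      xs.foldl (fun acc x =>
        PySem.List.insertBy
          (fun a b => decide ((if p a then (0 : Int) else 1) < (if p b then (0 : Int) else 1)))
          x acc) (F ++ R)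
      = (F ++ xs.filter p) ++ (R ++ xs.filter (fun x => !p x)) := by
  intro xs
  induction xs with
  | nil => simp
  | cons x xs ih =>
    intro F R hF hR
    by_cases h : p x = true
    · rw [List.foldl_cons, pvInsert_match p x h F R hF hR]
      have hF' : ∀ y ∈ F ++ [x], p y = true := by
        intro y hy
        rcases List.mem_append.1 hy with h' | h'
        · exact hF y h'
        · simp only [List.mem_singleton] at h'; subst h'; exact h
      have hsplit : F ++ x :: R = (F ++ [x]) ++ R := by simp
      rw [hsplit, ih (F ++ [x]) R hF' hR]
      simp [h]
    · simp only [Bool.not_eq_true] at h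
      have hR' : ∀ y ∈ R ++ [x], p y = false := by
        intro y hy
        rcases List.mem_append.1 hy with h' | h'
        · exact hR y h'
        · simp only [List.mem_singleton] at h'; subst h'; exact h
      rw [List.foldl_cons, pvInsert_nonmatch p x h (F ++ R), List.append_assoc]
      rw [ih F (R ++ [x]) hF hR']
      simp [h]

theorem pvSorted_eq_partition (p : String → Bool) (xs : List String) :
    PySem.List.sorted xs (fun k => if p k then (0 : Int) else 1) false
      = xs.filter p ++ xs.filter (fun x => !p x) := by
  rw [PySem.List.sorted_eq_foldl_insertBy]
  have := pvSorted_partition p xs [] [] (by simp) (by simp)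
  simpa using this

-- ===== VERDICT (by name: the statement is the Claim_ definition above) =====
theorem filter_keywords_by_platform_py_spec : Claim_equal_filter_keywords_by_platform_py := by
  intro keywords platform _
  unfold Spec_filter_keywords_by_platform_py
  unfold filter_keywords_by_platform_py filter_keywords_by_platform_py_alt
  simp only [ne_eq]
  set prefs := pvPlatformPrefs.getD platform [] with hprefs
  set m := fun (keyword : String) => prefs.any (fun pref => PySem.Str.isIn pref keyword) with hm
  by_cases hp : prefs = []
  · rw [if_neg (by simp [hp]), if_pos hp]
  · rw [if_pos (by simp [hp]), if_neg hp]
    rw [pvFoldl_partition m keywords [] []]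
    simp only [List.nil_append]
    have hcount : keywords.countP m = (keywords.filter m).length :=
      List.countP_eq_length_filter
    have hlen : keywords.length
        = (keywords.filter m).length + (keywords.filter (fun x => !m x)).length :=
      List.length_eq_length_filter_add m
    by_cases hb : (keywords.filter m).length < keywords.length / 2
    · rw [if_pos hb, if_neg (by simp only [← hm]; omega)]
      rw [pvSorted_eq_partition m keywords]
      congr 1
      have hnn : (0 : Int) ≤ (keywords.length : Int) - ((keywords.filter m).length : Int) := by
        omega
      rw [PySem.List.slice_to _ hnn]
      have ht : ((keywords.length : Int) - ((keywords.filter m).length : Int)).toNat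
          = (keywords.filter (fun x => !m x)).length := by omega
      rw [ht, List.take_of_length_le (le_refl _)]
    · rw [if_neg hb, if_pos (by simp only [← hm]; omega)]
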